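-- pv_equiv track=rewrite | github.com/vpetrakis/fleet-rh-dashboard | services/brain/parser.py | _section_boundaries
-- ===== SOURCE A (Python) =====
-- def _section_boundaries(cells: list[str]) -> tuple[int, int]:
--     """
--     Returns (aux_start, dg_start).
--     • aux_start: index of the "AUX. ENGINE" header row
--     • dg_start:  index just before the "D/G No1" header row
--     """
--     aux_start = len(cells)
--     dg_start  = len(cells)
--     for i, c in enumerate(cells):
--         cu = c.upper()
--         if aux_start == len(cells) and "AUX. ENGINE" in cu and len(c) < 60:
--             aux_start = i
--         if dg_start == len(cells) and cu in ("D/G NO1", "D/G NO2", "D/G NO3"):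
--             dg_start = max(0, i - 4)
--             break
--     return aux_start, dg_start
-- ===== SOURCE B (Python) =====
-- def _section_boundaries(cells: list[str]) -> tuple[int, int]:
--     n = len(cells)
--     dg_idx = next((i for i, c in enumerate(cells)
--                    if c.upper() in ("D/G NO1", "D/G NO2", "D/G NO3")), None)
--     dg_start = n if dg_idx is None else max(0, dg_idx - 4)
--     search = cells if dg_idx is None else cells[:dg_idx + 1]
--     aux_start = next((i for i, c in enumerate(search)
--                       if "AUX. ENGINE" in c.upper() and len(c) < 60), n)
--     return aux_start, dg_start
-- ===== Notes on version B (the rewrite author's own statement) =====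
-- stated objective: idiomatic
-- what changed: Replaces A's single stateful loop with sentinel-guarded flags and a break by two declarative next()-over-generator passes: one scan finds the first D/G header, a second scan over the prefix up to (and including) that row finds the AUX. ENGINE header.
import Mathlib
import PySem

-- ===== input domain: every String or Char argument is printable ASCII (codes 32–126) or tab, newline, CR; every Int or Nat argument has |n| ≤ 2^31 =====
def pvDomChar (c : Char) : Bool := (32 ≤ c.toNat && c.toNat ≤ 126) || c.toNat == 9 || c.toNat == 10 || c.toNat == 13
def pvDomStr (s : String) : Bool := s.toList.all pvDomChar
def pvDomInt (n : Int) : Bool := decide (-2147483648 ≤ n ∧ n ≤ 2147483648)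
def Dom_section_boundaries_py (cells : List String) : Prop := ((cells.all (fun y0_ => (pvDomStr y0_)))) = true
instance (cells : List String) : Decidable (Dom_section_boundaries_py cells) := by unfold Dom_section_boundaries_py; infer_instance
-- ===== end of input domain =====

-- B replaces A's single stateful loop (sentinel flags + break) by two next()-style scans; same result, same cost.

-- ===== PORT A =====
-- the for-loop of _section_boundaries: state (aux_start, dg_start), break on the D/G row
def pvLoopA (n : Int) : List (Int × String) → Int → Int → Int × Int
  | [], aux, dg => (aux, dg)
  | (i, c) :: rest, aux, dg =>
    let cu := PySem.Str.upper c
    let aux' := if aux == n && PySem.Str.isIn "AUX. ENGINE" cu && decide (PySem.Str.len c < 60) then i else aux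
    if dg == n && (cu == "D/G NO1" || cu == "D/G NO2" || cu == "D/G NO3") then
      (aux', max 0 (i - 4))
    else
      pvLoopA n rest aux' dg

def section_boundaries_py (cells : List String) : Int × Int :=
  let n : Int := PySem.List.len cells
  pvLoopA n (PySem.List.enumerate cells) n n

-- ===== PORT B =====
def pvIsDG (c : String) : Bool :=
  PySem.Str.upper c == "D/G NO1" || PySem.Str.upper c == "D/G NO2" || PySem.Str.upper c == "D/G NO3"

def pvIsAux (c : String) : Bool :=
  PySem.Str.isIn "AUX. ENGINE" (PySem.Str.upper c) && decide (PySem.Str.len c < 60)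

-- next((i for i, c in enumerate(…) if p c), default) : the scan part, default applied at the call site
def pvFirstDG : List (Int × String) → Option Int
  | [] => none
  | (i, c) :: rest => if pvIsDG c then some i else pvFirstDG rest

def pvFirstAux : List (Int × String) → Option Int
  | [] => none
  | (i, c) :: rest => if pvIsAux c then some i else pvFirstAux rest

def section_boundaries_py_alt (cells : List String) : Int × Int :=
  let n : Int := PySem.List.len cells
  let dgIdx := pvFirstDG (PySem.List.enumerate cells)
  let dgStart := match dgIdx with | none => n | some i => max 0 (i - 4)
  let search := match dgIdx with | none => cells | some i => PySem.List.slice cells none (some (i + 1))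
  let auxStart := (pvFirstAux (PySem.List.enumerate search)).getD n
  (auxStart, dgStart)

-- ===== PRECONDITION & SPEC =====
def Spec_section_boundaries_py (cells : List String) (out : Int × Int) : Prop := out = section_boundaries_py_alt cells
instance (cells : List String) (out : Int × Int) : Decidable (Spec_section_boundaries_py cells out) := by unfold Spec_section_boundaries_py; infer_instance

-- ===== CLAIM (what is proved, stated in full; the proofs are below) =====
def Claim_equal_section_boundaries_py : Prop := ∀ (cells : List String), Dom_section_boundaries_py cells → Spec_section_boundaries_py cells (section_boundaries_py cells)

-- ===== LEMMAS AND PROOFS =====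

theorem pvFirstDG_ge (xs : List String) (s j : Int) (h : pvFirstDG (PySem.List.enumerate xs s) = some j) : s ≤ j := by
  induction xs generalizing s with
  | nil => simp [PySem.List.enumerate_nil, pvFirstDG] at h
  | cons x xs ih =>
    rw [PySem.List.enumerate_cons] at h
    simp only [pvFirstDG] at h
    split at h
    · cases h; omega
    · have := ih (s + 1) h; omega

theorem pvFirstAux_ge (xs : List String) (s j : Int) (h : pvFirstAux (PySem.List.enumerate xs s) = some j) : s ≤ j := by
  induction xs generalizing s with
  | nil => simp [PySem.List.enumerate_nil, pvFirstAux] at h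
  | cons x xs ih =>
    rw [PySem.List.enumerate_cons] at h
    simp only [pvFirstAux] at h
    split at h
    · cases h; omega
    · have := ih (s + 1) h; omega

-- result of B's two scans, as a function of the enumerated list
def pvDgVal (e : List (Int × String)) (n : Int) : Int :=
  match pvFirstDG e with | none => n | some j => max 0 (j - 4)

def pvAuxVal (e : List (Int × String)) (n : Int) : Int :=
  match pvFirstAux e, pvFirstDG e with
  | none, _ => n
  | some a, none => a
  | some a, some j => if a ≤ j then a else n

-- keep a found index only if it is below the bound
def pvClip (o : Option Int) (b : Int) : Option Int :=
  match o with | none => none | some a => if a < b then some a else none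

theorem pvClip_none (b : Int) : pvClip none b = none := rfl
theorem pvClip_some (a b : Int) : pvClip (some a) b = if a < b then some a else none := rfl

-- once aux_start is set (≠ n), A's loop only hunts for the D/G header
theorem pvLoopA_auxSet (xs : List String) (s n aux : Int) (h : aux ≠ n) :
    pvLoopA n (PySem.List.enumerate xs s) aux n = (aux, pvDgVal (PySem.List.enumerate xs s) n) := by
  induction xs generalizing s with
  | nil => simp [PySem.List.enumerate_nil, pvLoopA, pvDgVal, pvFirstDG]
  | cons x xs ih =>
    rw [PySem.List.enumerate_cons]
    have hb : (aux == n) = false := by simp [h]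
    simp only [pvLoopA, pvDgVal, pvFirstDG, pvIsDG, hb, Bool.false_and, Bool.false_eq_true,
      if_false, beq_self_eq_true, Bool.true_and]
    by_cases hD : (PySem.Str.upper x == "D/G NO1" || PySem.Str.upper x == "D/G NO2" || PySem.Str.upper x == "D/G NO3") = true
    · rw [if_pos hD, if_pos hD]
    · rw [if_neg hD, if_neg hD, ih (s + 1)]
      simp [pvDgVal]

-- A's loop from the unset state computes exactly B's two-scan values
theorem pvLoopA_eq (xs : List String) (s n : Int) (h : s + xs.length = n) :
    pvLoopA n (PySem.List.enumerate xs s) n n =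
      (pvAuxVal (PySem.List.enumerate xs s) n, pvDgVal (PySem.List.enumerate xs s) n) := by
  induction xs generalizing s with
  | nil => simp [PySem.List.enumerate_nil, pvLoopA, pvAuxVal, pvDgVal, pvFirstDG, pvFirstAux]
  | cons x xs ih =>
    have hsn : s ≠ n := by simp at h; omega
    rw [PySem.List.enumerate_cons]
    simp only [pvLoopA, pvAuxVal, pvDgVal, pvFirstDG, pvFirstAux, pvIsDG, pvIsAux, beq_self_eq_true,
      Bool.true_and]
    by_cases hA : (PySem.Str.isIn "AUX. ENGINE" (PySem.Str.upper x) && decide (PySem.Str.len x < 60)) = true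
    · simp only [hA, if_true]
      by_cases hD : (PySem.Str.upper x == "D/G NO1" || PySem.Str.upper x == "D/G NO2" || PySem.Str.upper x == "D/G NO3") = true
      · simp [hD]
      · simp only [hD, Bool.false_eq_true, if_false]
        rw [pvLoopA_auxSet xs (s + 1) n s hsn]
        simp only [pvDgVal]
        cases hdg : pvFirstDG (PySem.List.enumerate xs (s + 1)) with
        | none => simp
        | some j =>
          have := pvFirstDG_ge xs (s + 1) j hdg
          simp only []
          rw [if_pos (by omega)]
    · simp only [hA, Bool.false_eq_true, if_false]
      by_cases hD : (PySem.Str.upper x == "D/G NO1" || PySem.Str.upper x == "D/G NO2" || PySem.Str.upper x == "D/G NO3") = true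
      · simp only [hD, if_true]
        cases haux : pvFirstAux (PySem.List.enumerate xs (s + 1)) with
        | none => simp
        | some a =>
          have := pvFirstAux_ge xs (s + 1) a haux
          simp only []
          rw [if_neg (by omega)]
      · simp only [hD, Bool.false_eq_true, if_false]
        rw [ih (s + 1) (by simp at h ⊢; omega)]
        simp only [pvAuxVal, pvDgVal]

-- the AUX scan over a take-prefix, against the unbounded scan
theorem pvFirstAux_take (xs : List String) (s : Int) (m : Nat) :
    pvFirstAux (PySem.List.enumerate (xs.take m) s) =
      pvClip (pvFirstAux (PySem.List.enumerate xs s)) (s + m) := by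
  induction xs generalizing s m with
  | nil => simp [PySem.List.enumerate_nil, pvFirstAux, pvClip]
  | cons x xs ih =>
    cases m with
    | zero =>
      rw [PySem.List.enumerate_cons]
      simp only [List.take_zero, PySem.List.enumerate_nil, pvFirstAux]
      by_cases hx : pvIsAux x = true
      · rw [if_pos hx, pvClip_some, if_neg (by push_cast; omega)]
      · rw [if_neg hx]
        cases haux : pvFirstAux (PySem.List.enumerate xs (s + 1)) with
        | none => rw [pvClip_none]
        | some a =>
          have := pvFirstAux_ge xs (s + 1) a haux
          rw [pvClip_some, if_neg (by push_cast; omega)]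
    | succ m =>
      simp only [List.take_succ_cons]
      rw [PySem.List.enumerate_cons, PySem.List.enumerate_cons]
      simp only [pvFirstAux]
      by_cases hx : pvIsAux x = true
      · rw [if_pos hx, if_pos hx, pvClip_some, if_pos (by push_cast; omega)]
      · rw [if_neg hx, if_neg hx, ih (s + 1) m]
        cases pvFirstAux (PySem.List.enumerate xs (s + 1)) with
        | none => rw [pvClip_none, pvClip_none]
        | some a =>
          rw [pvClip_some, pvClip_some]
          by_cases hlt : a < s + 1 + (m : Int)
          · rw [if_pos hlt, if_pos (by push_cast; omega)]
          · rw [if_neg hlt, if_neg (by push_cast; omega)]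

-- ===== VERDICT (by name: the statement is the Claim_ definition above) =====
theorem section_boundaries_py_spec : Claim_equal_section_boundaries_py := by
  intro cells _
  unfold Spec_section_boundaries_py section_boundaries_py section_boundaries_py_alt
  simp only [PySem.List.len_eq]
  rw [pvLoopA_eq cells 0 cells.length (by omega)]
  cases hdg : pvFirstDG (PySem.List.enumerate cells 0) with
  | none =>
    simp only [pvAuxVal, pvDgVal, hdg]
    cases pvFirstAux (PySem.List.enumerate cells 0) <;> simp
  | some j =>
    have hj0 : (0 : Int) ≤ j := pvFirstDG_ge cells 0 j hdg
    simp only [pvAuxVal, pvDgVal, hdg]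
    rw [PySem.List.slice_to cells (by omega : (0:Int) ≤ j + 1)]
    rw [pvFirstAux_take cells 0 (j + 1).toNat]
    cases pvFirstAux (PySem.List.enumerate cells 0) with
    | none => simp [pvClip]
    | some a =>
      rw [pvClip_some]
      by_cases hle : a ≤ j
      · rw [if_pos (by omega)]
        simp [hle]
      · rw [if_neg (by omega)]
        simp [hle]
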